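-- pv_equiv track=rewrite | github.com/waabiisaabii/adventOfCode2020 | day_3/solve.py | part_1
-- ===== SOURCE A (Python) =====
-- from typing import List
--
-- def part_1(inputs: List[str],
--     right_offset: int,
--     bottom_offset: int) -> int:
--     count = 0
--     i = 0
--     j = 0
--     while i < len(inputs):
--         current = inputs[i][j]
--         count = count + (1 if current == '#' else 0)
--         i = i + bottom_offset
--         j = (j + right_offset) % len(inputs[0])
--     return count
-- ===== SOURCE B (Python) =====
-- from typing import List
--
-- def part_1(inputs: List[str],
--     right_offset: int,
--     bottom_offset: int) -> int:
--     if not inputs: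
--         return 0
--     width = len(inputs[0])
--     rows = [inputs[i] for i in range(0, len(inputs), bottom_offset)]
--     total = 0
--     # Group the visited steps by their residue class modulo the grid width:
--     # steps t, t+width, t+2*width, ... all land in the same column, so that
--     # column is computed once per class and each class is scanned in turn.
--     for t in range(width):
--         col = (t * right_offset) % width
--         for k in range(t, len(rows), width):
--             if rows[k][col] == '#':
--                 total += 1
--     return total
-- ===== Notes on version B (the rewrite author's own statement) =====
-- stated objective: alternative
-- what changed: Instead of A's single flat walk with a running column accumulator, B first slices out the visited rows, then traverses them grouped by residue class modulo the grid width (a nested loop over residue classes), computing each class's column once and counting hits class by class; correctness rests on the column sequence being periodic with period width.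
import Mathlib
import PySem

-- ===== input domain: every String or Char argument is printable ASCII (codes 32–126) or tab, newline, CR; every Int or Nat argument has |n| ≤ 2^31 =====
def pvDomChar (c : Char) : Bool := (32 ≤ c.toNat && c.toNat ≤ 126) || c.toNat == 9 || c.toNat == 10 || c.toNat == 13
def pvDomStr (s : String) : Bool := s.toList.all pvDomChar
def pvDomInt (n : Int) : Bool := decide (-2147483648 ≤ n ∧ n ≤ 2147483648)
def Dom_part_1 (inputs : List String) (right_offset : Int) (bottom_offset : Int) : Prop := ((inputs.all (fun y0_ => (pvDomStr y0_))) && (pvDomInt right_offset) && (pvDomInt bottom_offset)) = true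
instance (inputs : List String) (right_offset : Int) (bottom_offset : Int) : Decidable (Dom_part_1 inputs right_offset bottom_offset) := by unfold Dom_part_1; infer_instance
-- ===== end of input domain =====

-- B replaces A's flat walk with its running column accumulator by a staged,
-- column-grouped traversal: it slices out the visited rows, then scans them
-- grouped by residue class modulo the grid width, computing each class's
-- column once (objective: alternative decomposition, same cost).

-- ===== PORT A =====
-- literal port of A's while loop; fuel bounds the iterations (under Pre_ the loop
-- performs at most inputs.length iterations, since bottom_offset ≥ 1)
def part1Go (inputs : List String) (right_offset bottom_offset : Int) :
    Nat → Int → Int → Int → Int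
  | 0, _, _, count => count
  | fuel + 1, i, j, count =>
    if i < (inputs.length : Int) then
      let current := (PySem.Str.pyGet? ((PySem.List.pyGet? inputs i).getD "") j).getD ' '
      part1Go inputs right_offset bottom_offset fuel (i + bottom_offset)
        (PySem.Int.mod (j + right_offset) ((inputs.headD "").toList.length : Int))
        (count + (if current = '#' then 1 else 0))
    else count

def part_1 (inputs : List String) (right_offset : Int) (bottom_offset : Int) : Int :=
  part1Go inputs right_offset bottom_offset (inputs.length + 1) 0 0 0

-- ===== PORT B =====
-- port of Source B: slice out the visited rows, then a nested loop over residue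
-- classes t modulo the width, each class scanned with stride = width
def part_1_alt (inputs : List String) (right_offset : Int) (bottom_offset : Int) : Int :=
  if inputs = [] then 0
  else
    let width : Int := ((inputs.headD "").toList.length : Int)
    let rows := (PySem.List.pyRange 0 (inputs.length : Int) bottom_offset).map
      (fun i => (PySem.List.pyGet? inputs i).getD "")
    (PySem.List.pyRange 0 width 1).foldl (fun total t =>
      (PySem.List.pyRange t ((rows.length : Int)) width).foldl (fun tot k =>
        tot + (if (PySem.Str.pyGet? ((PySem.List.pyGet? rows k).getD "")
                     (PySem.Int.mod (t * right_offset) width)).getD ' ' = '#'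
               then 1 else 0)) total) 0

-- ===== PRECONDITION & SPEC =====
-- Pre_ is exactly where Python A returns: on nonempty input, bottom_offset ≤ 0 makes
-- A's while loop diverge or run into an IndexError, and every visited cell
-- inputs[k*bottom_offset][(k*right_offset) % len(inputs[0])] must exist (else IndexError,
-- or ZeroDivisionError when the first row is empty — both captured by the k-th bound below).
def Pre_part_1 (inputs : List String) (right_offset : Int) (bottom_offset : Int) : Prop :=
  inputs = [] ∨
    (0 < bottom_offset ∧ ∀ k : Nat, k < inputs.length → k * bottom_offset.toNat < inputs.length →
      (PySem.Int.mod ((k : Int) * right_offset) ((inputs.headD "").toList.length : Int)).toNat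
        < (inputs.getD (k * bottom_offset.toNat) "").toList.length)

instance (inputs : List String) (right_offset : Int) (bottom_offset : Int) : Decidable (Pre_part_1 inputs right_offset bottom_offset) := by unfold Pre_part_1; infer_instance

def pvWitness_part_1 : List String × Int × Int := (["#..", ".#.", "..#"], 1, 1)

def Spec_part_1 (inputs : List String) (right_offset : Int) (bottom_offset : Int) (out : Int) : Prop := out = part_1_alt inputs right_offset bottom_offset
instance (inputs : List String) (right_offset : Int) (bottom_offset : Int) (out : Int) : Decidable (Spec_part_1 inputs right_offset bottom_offset out) := by unfold Spec_part_1; infer_instance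

-- ===== CLAIM (what is proved, stated in full; the proofs are below) =====
def Claim_equal_part_1 : Prop := ∀ (inputs : List String) (right_offset : Int) (bottom_offset : Int), Dom_part_1 inputs right_offset bottom_offset → Pre_part_1 inputs right_offset bottom_offset → Spec_part_1 inputs right_offset bottom_offset (part_1 inputs right_offset bottom_offset)

-- ===== LEMMAS AND PROOFS =====

-- the contribution of step k (row k*b, column (k*r) % width), shared shape of both sides
def hit (inputs : List String) (right_offset bottom_offset : Int) (k : Nat) : Int :=
  if (PySem.Str.pyGet? ((PySem.List.pyGet? inputs ((k * bottom_offset.toNat : Nat) : Int)).getD "")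
        (PySem.Int.mod ((k : Int) * right_offset) ((inputs.headD "").toList.length : Int))).getD ' '
      = '#'
  then (1 : Int) else 0

lemma pymod_zero_left (L : Int) : PySem.Int.mod 0 L = 0 := by
  simp [PySem.Int.mod]

lemma getD_zero_headD (inputs : List String) : inputs.getD 0 "" = inputs.headD "" := by
  cases inputs <;> rfl

lemma step_lt (n k : Nat) (b : Int) (hb : 0 < b) :
    k * b.toNat < n ↔ (k : Int) * b < (n : Int) := by
  zify
  rw [Int.toNat_of_nonneg hb.le]

lemma lt_K_iff (n k : Nat) (b : Int) (hb : 0 < b) :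
    k < (((n : Int) + b - 1) / b).toNat ↔ (k : Int) * b < (n : Int) := by
  rw [Int.lt_toNat]
  constructor
  · intro h
    have h2 : ((k : Int) + 1) * b ≤ (n : Int) + b - 1 :=
      (Int.le_ediv_iff_mul_le hb).mp (by omega)
    nlinarith
  · intro h
    have h2 : ((k : Int) + 1) * b ≤ (n : Int) + b - 1 := by nlinarith
    have := (Int.le_ediv_iff_mul_le hb).mpr h2
    omega

lemma goSum (inputs : List String) (r b : Int) (hb : 0 < b)
    (hL : 0 < ((inputs.headD "").toList.length : Int)) :
    ∀ (fuel k : Nat) (c : Int), inputs.length ≤ fuel + k * b.toNat →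
    part1Go inputs r b fuel ((k * b.toNat : Nat) : Int)
        (PySem.Int.mod ((k : Int) * r) ((inputs.headD "").toList.length : Int)) c
      = c + ((List.range ((((inputs.length : Int) + b - 1) / b).toNat - k)).map
               (fun t => hit inputs r b (k + t))).sum := by
  intro fuel
  induction fuel with
  | zero =>
    intro k c hfuel
    have hnk : ¬ k * b.toNat < inputs.length := by omega
    have hK : (((inputs.length : Int) + b - 1) / b).toNat - k = 0 := by
      have := (lt_K_iff inputs.length k b hb).not.mpr
        ((step_lt inputs.length k b hb).not.mp hnk)
      omega
    simp [part1Go, hK]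
  | succ fuel ih =>
    intro k c hfuel
    by_cases hcond : ((k * b.toNat : Nat) : Int) < (inputs.length : Int)
    · have hklt : k * b.toNat < inputs.length := by exact_mod_cast hcond
      have hbn : 1 ≤ b.toNat := by omega
      have hi : ((k * b.toNat : Nat) : Int) + b = (((k + 1) * b.toNat : Nat) : Int) := by
        push_cast [Int.toNat_of_nonneg hb.le]
        ring
      have hj : PySem.Int.mod
            (PySem.Int.mod ((k : Int) * r) ((inputs.headD "").toList.length : Int) + r)
            ((inputs.headD "").toList.length : Int)
          = PySem.Int.mod (((k + 1 : Nat) : Int) * r) ((inputs.headD "").toList.length : Int) := by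
        rw [PySem.Int.mod_eq_emod_of_pos hL, PySem.Int.mod_eq_emod_of_pos hL,
          PySem.Int.mod_eq_emod_of_pos hL, Int.emod_add_emod]
        push_cast
        ring_nf
      have hfuel' : inputs.length ≤ fuel + (k + 1) * b.toNat := by
        have hmul : (k + 1) * b.toNat = k * b.toNat + b.toNat := by ring
        omega
      have hKsucc : (((inputs.length : Int) + b - 1) / b).toNat - k
          = ((((inputs.length : Int) + b - 1) / b).toNat - (k + 1)) + 1 := by
        have := (lt_K_iff inputs.length k b hb).mpr
          ((step_lt inputs.length k b hb).mp hklt)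
        omega
      simp only [part1Go, hcond, if_true, hi, hj]
      rw [ih (k + 1) _ hfuel']
      rw [hKsucc, List.range_succ_eq_map, List.map_cons, List.sum_cons, List.map_map]
      have hfun : ((fun t => hit inputs r b (k + t)) ∘ Nat.succ)
          = fun t => hit inputs r b (k + 1 + t) := by
        funext t
        simp [Function.comp, Nat.succ_eq_add_one]
        ring_nf
      rw [hfun]
      simp [hit]
      ring
    · have hnk : ¬ k * b.toNat < inputs.length := by exact_mod_cast hcond
      have hK : (((inputs.length : Int) + b - 1) / b).toNat - k = 0 := by
        have := (lt_K_iff inputs.length k b hb).not.mpr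
          ((step_lt inputs.length k b hb).not.mp hnk)
        omega
      simp only [part1Go]
      rw [if_neg hcond]
      simp [hK]

-- list sums over range as Finset sums
lemma list_sum_range (f : Nat → Int) (n : Nat) :
    ((List.range n).map f).sum = ∑ i ∈ Finset.range n, f i := by
  induction n with
  | zero => simp
  | succ n ih => simp [List.range_succ, Finset.sum_range_succ, ih]

-- count of q with t + w*q < N, as pyRange_of_pos produces it
lemma lt_cnt_iff (N t : Int) {w : Int} (hw : 0 < w) (q : Nat) :
    q < (if t < N then ((N - t + w - 1) / w).toNat else 0) ↔ t + w * (q : Int) < N := by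
  split_ifs with h
  · rw [Int.lt_toNat]
    constructor
    · intro hq
      have h2 : ((q : Int) + 1) * w ≤ N - t + w - 1 :=
        (Int.le_ediv_iff_mul_le hw).mp (by omega)
      nlinarith
    · intro hq
      have h2 : ((q : Int) + 1) * w ≤ N - t + w - 1 := by nlinarith
      have := (Int.le_ediv_iff_mul_le hw).mpr h2
      omega
  · have hq : (0 : Int) ≤ w * (q : Int) := by positivity
    constructor
    · omega
    · intro hlt
      omega

-- regrouping the steps 0..K-1 by their residue class modulo wn
lemma regroup (F : Nat → Int) (K wn : Nat) (hw : 0 < wn) (cnt : Nat → Nat)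
    (hcnt : ∀ t q : Nat, q < cnt t ↔ t + wn * q < K) :
    ∑ t ∈ Finset.range wn, ∑ q ∈ Finset.range (cnt t), F (t + wn * q)
      = ∑ k ∈ Finset.range K, F k := by
  rw [← Finset.sum_fiberwise_of_maps_to (g := fun k => k % wn) (t := Finset.range wn)
        (fun k _ => Finset.mem_range.mpr (Nat.mod_lt k hw)) F]
  refine Finset.sum_congr rfl ?_
  intro t ht
  have htw : t < wn := Finset.mem_range.mp ht
  refine Finset.sum_nbij' (fun q => t + wn * q) (fun k => (k - t) / wn) ?_ ?_ ?_ ?_ ?_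
  · intro q hq
    simp only [Finset.mem_filter, Finset.mem_range]
    refine ⟨(hcnt t q).mp (Finset.mem_range.mp hq), ?_⟩
    rw [Nat.add_mul_mod_self_left, Nat.mod_eq_of_lt htw]
  · intro k hk
    simp only [Finset.mem_filter, Finset.mem_range] at hk
    obtain ⟨hkK, hkt⟩ := hk
    have hdm := Nat.div_add_mod k wn
    have hk_eq : wn * (k / wn) + t = k := by omega
    have hsub : (k - t) / wn = k / wn := by
      have : k - t = wn * (k / wn) := by omega
      rw [this, Nat.mul_div_cancel_left _ hw]
    rw [Finset.mem_range]
    simp only [hsub]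
    exact (hcnt t (k / wn)).mpr (by omega)
  · intro q _
    simp only [Nat.add_sub_cancel_left, Nat.mul_div_cancel_left _ hw]
  · intro k hk
    simp only [Finset.mem_filter, Finset.mem_range] at hk
    obtain ⟨hkK, hkt⟩ := hk
    have hdm := Nat.div_add_mod k wn
    have hk_eq : wn * (k / wn) + t = k := by omega
    have hsub : (k - t) / wn = k / wn := by
      have : k - t = wn * (k / wn) := by omega
      rw [this, Nat.mul_div_cancel_left _ hw]
    simp only [hsub]
    omega
  · intro q _
    rfl

-- B's nested foldl, regrouped: it equals the plain sum of hit over all steps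
set_option maxHeartbeats 1000000 in
lemma altSum (inputs : List String) (r b : Int) (hb : 0 < b) (hne : inputs ≠ [])
    (hL0 : 0 < (inputs.headD "").toList.length) :
    part_1_alt inputs r b
      = ∑ k ∈ Finset.range (((inputs.length : Int) + b - 1) / b).toNat,
          hit inputs r b k := by
  have hn : (0 : Int) < (inputs.length : Int) := by
    have := List.length_pos_iff.mpr hne
    exact_mod_cast this
  set wn := (inputs.headD "").toList.length with hwn
  have hwI : (0 : Int) < (wn : Int) := by exact_mod_cast hL0
  set K := (((inputs.length : Int) + b - 1) / b).toNat with hK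
  set cnt : Nat → Nat := fun t =>
    if ((t : Nat) : Int) < ((K : Nat) : Int)
    then (((K : Int) - (t : Int) + (wn : Int) - 1) / (wn : Int)).toNat else 0 with hcntdef
  have hcnt : ∀ t q : Nat, q < cnt t ↔ t + wn * q < K := by
    intro t q
    have h := lt_cnt_iff ((K : Nat) : Int) ((t : Nat) : Int) hwI q
    rw [hcntdef]
    simp only []
    rw [h]
    constructor
    · intro hlt; exact_mod_cast hlt
    · intro hlt; exact_mod_cast hlt
  -- rows = (List.range K).map g
  have hrows : (PySem.List.pyRange 0 (inputs.length : Int) b).map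
        (fun i => (PySem.List.pyGet? inputs i).getD "")
      = (List.range K).map
          (fun q => (PySem.List.pyGet? inputs ((0 : Int) + b * (q : Nat))).getD "") := by
    rw [PySem.List.pyRange_of_pos 0 (inputs.length : Int) hb, List.map_map]
    simp only [if_pos hn, sub_zero, hK]
    rfl
  simp only [part_1_alt, if_neg hne, hrows, ← hwn]
  have hlen : ((List.range K).map
      (fun q => (PySem.List.pyGet? inputs ((0 : Int) + b * (q : Nat))).getD "")).length = K := by
    simp
  rw [hlen]
  -- inner foldl → sum
  have hbody : ∀ (total t : Int),
      (PySem.List.pyRange t (K : Int) (wn : Int)).foldl (fun tot k =>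
        tot + (if (PySem.Str.pyGet? ((PySem.List.pyGet? ((List.range K).map
                     (fun q => (PySem.List.pyGet? inputs ((0 : Int) + b * (q : Nat))).getD "")) k).getD "")
                     (PySem.Int.mod (t * r) (wn : Int))).getD ' ' = '#'
               then 1 else 0)) total
      = total + ((PySem.List.pyRange t (K : Int) (wn : Int)).map (fun k =>
          (if (PySem.Str.pyGet? ((PySem.List.pyGet? ((List.range K).map
                     (fun q => (PySem.List.pyGet? inputs ((0 : Int) + b * (q : Nat))).getD "")) k).getD "")
                     (PySem.Int.mod (t * r) (wn : Int))).getD ' ' = '#'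
           then (1 : Int) else 0))).sum := fun total t => PySem.List.foldl_add _ _ _
  have hfe := funext (fun total => funext (fun t => hbody total t))
  rw [hfe, PySem.List.foldl_add, zero_add]
  -- outer range: pyRange 0 wn 1 → List.range wn
  rw [PySem.List.pyRange_one, sub_zero, Int.toNat_natCast, List.map_map, list_sum_range]
  rw [← regroup (hit inputs r b) K wn hL0 cnt hcnt]
  refine Finset.sum_congr rfl ?_
  intro t ht
  have htw : t < wn := Finset.mem_range.mp ht
  simp only [Function.comp, zero_add]
  -- inner pyRange at residue t
  rw [PySem.List.pyRange_of_pos ((t : Nat) : Int) ((K : Nat) : Int) hwI, List.map_map,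
    list_sum_range]
  refine Finset.sum_congr (by rw [hcntdef]) ?_
  intro q hq
  have hqc : q < cnt t := Finset.mem_range.mp hq
  have hm : t + wn * q < K := (hcnt t q).mp hqc
  simp only [Function.comp]
  have hidx : ((t : Nat) : Int) + ((wn : Nat) : Int) * ((q : Nat) : Int)
      = (((t + wn * q : Nat) : Nat) : Int) := by push_cast; ring
  have helem : (PySem.List.pyGet? ((List.range K).map
        (fun q => (PySem.List.pyGet? inputs (b * ((q : Nat) : Int))).getD ""))
        (((t + wn * q : Nat) : Nat) : Int)).getD ""
      = (PySem.List.pyGet? inputs ((((t + wn * q) * b.toNat : Nat) : Nat) : Int)).getD "" := by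
    have h1 : (PySem.List.pyGet? ((List.range K).map
        (fun q => (PySem.List.pyGet? inputs (b * ((q : Nat) : Int))).getD ""))
        (((t + wn * q : Nat) : Nat) : Int)).getD ""
        = PySem.List.pyGetD ((List.range K).map
            (fun q => (PySem.List.pyGet? inputs (b * ((q : Nat) : Int))).getD ""))
            (((t + wn * q : Nat) : Nat) : Int) "" := rfl
    rw [h1, PySem.List.pyGetD_natCast, PySem.List.getD_map_range _ _ _ _ hm]
    have harg : b * (((t + wn * q : Nat) : Nat) : Int)
        = ((((t + wn * q) * b.toNat : Nat) : Nat) : Int) := by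
      push_cast [Int.toNat_of_nonneg hb.le]
      ring
    rw [harg]
  have hcol : PySem.Int.mod (((t : Nat) : Int) * r) ((wn : Nat) : Int)
      = PySem.Int.mod ((((t + wn * q : Nat) : Nat) : Int) * r) ((wn : Nat) : Int) := by
    rw [PySem.Int.mod_eq_emod_of_pos hwI, PySem.Int.mod_eq_emod_of_pos hwI]
    have h2 : (((t + wn * q : Nat) : Nat) : Int) * r
        = ((t : Nat) : Int) * r + ((wn : Nat) : Int) * (((q : Nat) : Int) * r) := by
      push_cast; ring
    rw [h2, Int.add_mul_emod_self_left]
  simp only [hidx, hcol, helem, hit, ← hwn]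

-- ===== VERDICT (by name: the statement is the Claim_ definition above) =====
theorem part_1_spec : Claim_equal_part_1 := by
  intro inputs r b _ hpre
  unfold Spec_part_1
  by_cases hne : inputs = []
  · subst hne
    simp [part_1, part1Go, part_1_alt]
  · rcases hpre with hnil | ⟨hb, hacc⟩
    · exact absurd hnil hne
    have hlen : 0 < inputs.length := List.length_pos_iff.mpr hne
    have hL0 : 0 < (inputs.headD "").toList.length := by
      have h0 := hacc 0 hlen (by simpa using hlen)
      rw [show ((0 : Nat) : Int) = 0 from rfl, zero_mul, pymod_zero_left, Nat.zero_mul,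
        getD_zero_headD] at h0
      simpa using h0
    have hL : 0 < ((inputs.headD "").toList.length : Int) := by exact_mod_cast hL0
    have hA := goSum inputs r b hb hL (inputs.length + 1) 0 0 (by omega)
    simp only [Nat.zero_mul, Nat.cast_zero, Int.zero_mul, pymod_zero_left] at hA
    rw [altSum inputs r b hb hne hL0]
    calc part_1 inputs r b
        = part1Go inputs r b (inputs.length + 1) 0 0 0 := rfl
      _ = ∑ k ∈ Finset.range (((inputs.length : Int) + b - 1) / b).toNat,
            hit inputs r b k := by
          rw [hA, ← list_sum_range]
          simp
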